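-- pv_equiv track=rewrite | github.com/chplay2020/pdf-tool-evaluation | src/pipeline/chunking.py | detect_residual_table_ranges
-- ===== SOURCE A (Python) =====
-- def is_table_line(line: str) -> bool:
--     """Check if a line is part of a markdown table (guard for residual tables)."""
--     stripped = line.strip()
--     return '|' in stripped and stripped.count('|') >= 2
--
-- def detect_residual_table_ranges(text: str) -> list[tuple[int, int]]:
--     """
--     Detect any residual table blocks that weren't replaced by placeholders.
--     Returns list of (start_line, end_line) tuples.
--     """
--     lines = text.split('\n')
--     ranges: list[tuple[int, int]] = []
--
--     in_table = False
--     table_start = 0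
--     consecutive_no_pipe = 0
--
--     for i, line in enumerate(lines):
--         stripped = line.strip()
--         has_pipe = is_table_line(line)
--         is_heading = stripped.startswith('#')
--
--         if not in_table:
--             if has_pipe:
--                 # Look at window to confirm table
--                 window = lines[i:min(len(lines), i + 3)]
--                 pipe_count = sum(1 for w in window if is_table_line(w))
--                 if pipe_count >= 2:
--                     in_table = True
--                     table_start = i
--                     consecutive_no_pipe = 0
--         else:
--             if is_heading:
--                 # End table
--                 ranges.append((table_start, i - 1))
--                 in_table = False
--             elif has_pipe:
--                 consecutive_no_pipe = 0
--             elif stripped == '':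
--                 consecutive_no_pipe += 1
--                 if consecutive_no_pipe >= 2:
--                     ranges.append((table_start, i - consecutive_no_pipe))
--                     in_table = False
--             else:
--                 consecutive_no_pipe += 1
--                 if consecutive_no_pipe >= 2:
--                     ranges.append((table_start, i - consecutive_no_pipe))
--                     in_table = False
--
--     if in_table:
--         ranges.append((table_start, len(lines) - 1))
--
--     return ranges
-- ===== SOURCE B (Python) =====
-- def is_table_line(line: str) -> bool:
--     """Check if a line is part of a markdown table (guard for residual tables)."""
--     stripped = line.strip()
--     return '|' in stripped and stripped.count('|') >= 2
--
--
-- def _next_true(flags: list, n: int) -> list: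
--     """nxt[i] = smallest j >= i with flags[j] true, else n (length n+1)."""
--     nxt = [n] * (n + 1)
--     for i in range(n - 1, -1, -1):
--         nxt[i] = i if flags[i] else nxt[i + 1]
--     return nxt
--
--
-- def detect_residual_table_ranges(text: str) -> list[tuple[int, int]]:
--     """Staged passes: classify every line once (pipe / heading / non-pipe pair),
--     precompute next-occurrence index arrays, then jump from each confirmed
--     table start directly to its terminator instead of walking a state machine."""
--     lines = text.split('\n')
--     n = len(lines)
--     pipe = [is_table_line(l) for l in lines]
--     head = [l.strip().startswith('#') for l in lines]
--     # pair[j]: lines j-1 and j are both non-pipe (a "two consecutive gap lines" point)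
--     pair = []
--     prev = True  # sentinel: there is no line before line 0
--     for p in pipe:
--         pair.append(not prev and not p)
--         prev = p
--     nh = _next_true(head, n)
--     npr = _next_true(pair, n)
--     ranges: list[tuple[int, int]] = []
--     i = 0
--     while i < n:
--         if pipe[i] and pipe[i:i + 3].count(True) >= 2:
--             jh, jg = nh[i + 1], npr[i + 1]
--             if jh < n and jh <= jg:
--                 ranges.append((i, jh - 1))
--                 i = jh + 1
--             elif jg < n:
--                 ranges.append((i, jg - 2))
--                 i = jg + 1
--             else:
--                 ranges.append((i, n - 1))
--                 i = n
--         else: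
--             i += 1
--     return ranges
-- ===== Notes on version B (the rewrite author's own statement) =====
-- stated objective: alternative
-- what changed: Replaces A's single online state machine (in_table flag + consecutive_no_pipe counter updated line by line) with staged passes: classify every line once into pipe/heading/gap-pair flag arrays, precompute next-occurrence index arrays for headings and gap-pairs by a backward pass, then jump from each confirmed table start directly to its terminator by comparing the two precomputed indices.
import Mathlib
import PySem

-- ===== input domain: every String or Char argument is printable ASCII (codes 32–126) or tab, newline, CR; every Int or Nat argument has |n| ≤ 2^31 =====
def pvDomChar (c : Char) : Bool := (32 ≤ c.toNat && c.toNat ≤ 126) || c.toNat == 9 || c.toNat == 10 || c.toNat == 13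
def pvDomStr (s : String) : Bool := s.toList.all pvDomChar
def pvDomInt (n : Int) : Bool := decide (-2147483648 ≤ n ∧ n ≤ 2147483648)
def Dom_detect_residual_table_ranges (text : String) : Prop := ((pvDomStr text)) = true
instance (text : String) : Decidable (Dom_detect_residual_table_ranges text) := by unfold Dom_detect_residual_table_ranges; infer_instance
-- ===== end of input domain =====

-- B replaces A's online in_table/counter state machine by staged passes:
-- per-line flag arrays, backward-pass next-occurrence index arrays, and a
-- jump loop from each confirmed start straight to its terminator; same cost.

-- ===== PORT A =====
-- shared module helper (both Python files define the identical is_table_line)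
def is_table_line (line : String) : Bool :=
  let stripped := PySem.Str.strip line
  PySem.Str.isIn "|" stripped && decide (2 ≤ PySem.Str.count stripped "|")

-- for-loop over enumerate(lines): structural recursion on the remaining suffix,
-- carrying the index i and A's state (in_table, table_start, consecutive_no_pipe, ranges)
def loopA (lines : List String) : List String → Nat → Bool → Nat → Nat → List (Int × Int) → List (Int × Int)
  | [], _i, inT, st, _cnp, rs =>
      if inT then rs ++ [((st : Int), (lines.length : Int) - 1)] else rs
  | line :: rest, i, inT, st, cnp, rs =>
      let stripped := PySem.Str.strip line
      let has_pipe := is_table_line line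
      let is_heading := PySem.Str.startswith stripped "#"
      if !inT then
        if has_pipe then
          -- window = lines[i:min(len(lines), i+3)] = first 3 of the current suffix
          let window := (line :: rest).take 3
          let pipe_count := window.countP (fun w => is_table_line w)
          if 2 ≤ pipe_count then loopA lines rest (i+1) true i 0 rs
          else loopA lines rest (i+1) false st cnp rs
        else loopA lines rest (i+1) false st cnp rs
      else
        if is_heading then
          loopA lines rest (i+1) false st cnp (rs ++ [((st : Int), (i : Int) - 1)])
        else if has_pipe then
          loopA lines rest (i+1) true st 0 rs
        else if stripped == "" then
          let cnp' := cnp + 1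
          if 2 ≤ cnp' then loopA lines rest (i+1) false st cnp' (rs ++ [((st : Int), (i : Int) - (cnp' : Int))])
          else loopA lines rest (i+1) true st cnp' rs
        else
          let cnp' := cnp + 1
          if 2 ≤ cnp' then loopA lines rest (i+1) false st cnp' (rs ++ [((st : Int), (i : Int) - (cnp' : Int))])
          else loopA lines rest (i+1) true st cnp' rs

def detect_residual_table_ranges (text : String) : List (Int × Int) :=
  let lines := (PySem.Str.split? text "\n").getD []  -- text.split on newline; sep nonempty so split? is always some
  loopA lines lines 0 false 0 0 []

-- ===== PORT B =====
-- _next_true: nxt[i] = smallest j >= i with flags[j], else n; the Python fills the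
-- array backwards (nxt[i] = i if flags[i] else nxt[i+1]); here the same recurrence
-- as structural recursion computing the tail (entries i+1..n) first
def nextTrue (n : Nat) : List Bool → Nat → List Nat
  | [], _i => [n]
  | f :: rest, i =>
      let tail := nextTrue n rest (i+1)
      (if f then i else tail.headD n) :: tail

-- the pair-flag pass: pair[j] = not prev and not p, prev running over pipe (prev=True sentinel)
def pairOf : Bool → List Bool → List Bool
  | _, [] => []
  | prev, p :: rest => (!prev && !p) :: pairOf p rest

-- the while-loop: jump from each confirmed start to its terminator; fuel only
-- guards totality (i strictly increases, n+1 steps suffice)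
def loopB (pipe : List Bool) (nh npr : List Nat) (n : Nat) : Nat → Nat → List (Int × Int) → List (Int × Int)
  | 0, _i, rs => rs
  | fuel+1, i, rs =>
      if i < n then
        if pipe.getD i false && decide (2 ≤ ((pipe.drop i).take 3).count true) then
          let jh := nh.getD (i+1) n
          let jg := npr.getD (i+1) n
          if jh < n ∧ jh ≤ jg then
            loopB pipe nh npr n fuel (jh+1) (rs ++ [((i : Int), (jh : Int) - 1)])
          else if jg < n then
            loopB pipe nh npr n fuel (jg+1) (rs ++ [((i : Int), (jg : Int) - 2)])
          else rs ++ [((i : Int), (n : Int) - 1)]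
        else loopB pipe nh npr n fuel (i+1) rs
      else rs

def detect_residual_table_ranges_alt (text : String) : List (Int × Int) :=
  let lines := (PySem.Str.split? text "\n").getD []  -- text.split on newline; sep nonempty so split? is always some
  let n := lines.length
  let pipe := lines.map (fun l => is_table_line l)
  let head := lines.map (fun l => PySem.Str.startswith (PySem.Str.strip l) "#")
  let pair := pairOf true pipe
  let nh := nextTrue n head 0
  let npr := nextTrue n pair 0
  loopB pipe nh npr n (n+1) 0 []

-- ===== PRECONDITION & SPEC =====
def Spec_detect_residual_table_ranges (text : String) (out : List (Int × Int)) : Prop := out = detect_residual_table_ranges_alt text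
instance (text : String) (out : List (Int × Int)) : Decidable (Spec_detect_residual_table_ranges text out) := by unfold Spec_detect_residual_table_ranges; infer_instance

-- ===== CLAIM (what is proved, stated in full; the proofs are below) =====
def Claim_equal_detect_residual_table_ranges : Prop := ∀ (text : String), Dom_detect_residual_table_ranges text → Spec_detect_residual_table_ranges text (detect_residual_table_ranges text)

-- ===== LEMMAS AND PROOFS =====

-- functional spec of a nextTrue lookup: first index ≥ j whose flag is true, else n
def firstTrue (n : Nat) : List Bool → Nat → Nat
  | [], _j => n
  | f :: rest, j => if f then j else firstTrue n rest (j+1)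

theorem nextTrue_getD (n : Nat) : ∀ (flags : List Bool) (i0 k : Nat),
    (nextTrue n flags i0).getD k n = firstTrue n (flags.drop k) (i0 + k)
  | [], i0, k => by
      cases k <;> simp [nextTrue, firstTrue]
  | f :: rest, i0, k => by
      cases k with
      | zero =>
        have h0 := nextTrue_getD n rest (i0+1) 0
        simp [nextTrue, firstTrue, List.getD, List.headD_eq_head?_getD] at *
        cases f with
        | true => simp
        | false => simpa [List.head?_eq_getElem?] using h0
      | succ k =>
        have h := nextTrue_getD n rest (i0+1) k
        simp [nextTrue, List.getD] at *
        rw [h]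
        congr 1
        omega

theorem firstTrue_ge_or (n : Nat) : ∀ (flags : List Bool) (j : Nat),
    firstTrue n flags j = n ∨ j ≤ firstTrue n flags j
  | [], _j => Or.inl rfl
  | f :: rest, j => by
    simp only [firstTrue]
    split
    · exact Or.inr (le_refl j)
    · rcases firstTrue_ge_or n rest (j+1) with h | h
      · exact Or.inl h
      · exact Or.inr (by omega)

theorem firstTrue_ge (n : Nat) (flags : List Bool) (j : Nat) (h : j ≤ n) :
    j ≤ firstTrue n flags j := by
  rcases firstTrue_ge_or n flags j with h' | h' <;> omega

theorem pairOf_length : ∀ (prev : Bool) (l : List Bool), (pairOf prev l).length = l.length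
  | _, [] => rfl
  | prev, p :: rest => by simp [pairOf, pairOf_length p rest]

theorem pairOf_getD : ∀ (l : List Bool) (prev : Bool) (j : Nat), j < l.length →
    (pairOf prev l).getD j false
      = (!(if j = 0 then prev else l.getD (j-1) false) && !(l.getD j false))
  | [], _, j, h => by simp at h
  | p :: rest, prev, 0, _h => by simp [pairOf]
  | p :: rest, prev, j+1, h => by
    have ih := pairOf_getD rest p j (by simpa using h)
    simp only [pairOf, List.getD_cons_succ]
    rw [ih]
    rcases Nat.eq_zero_or_pos j with h0 | h0
    · subst h0; simp
    · have hj : j + 1 - 1 = (j - 1) + 1 := by omega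
      simp only [if_neg (by omega : ¬ j = 0), if_neg (by omega : ¬ j + 1 = 0), hj,
        List.getD_cons_succ]

-- abbreviations for B's precomputed data over a fixed line list (proof-only)
def Bpipe (lines : List String) : List Bool := lines.map (fun l => is_table_line l)
def BheadF (lines : List String) : List Bool := lines.map (fun l => PySem.Str.startswith (PySem.Str.strip l) "#")
def BpairF (lines : List String) : List Bool := pairOf true (Bpipe lines)
def Bloop (lines : List String) (fuel i : Nat) (rs : List (Int × Int)) : List (Int × Int) :=
  loopB (Bpipe lines) (nextTrue lines.length (BheadF lines) 0) (nextTrue lines.length (BpairF lines) 0) lines.length fuel i rs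
-- the value B's outer loop computes from a confirmed start once the two lookups are made
def Bjump (lines : List String) (fuel j start : Nat) (rs : List (Int × Int)) : List (Int × Int) :=
  if firstTrue lines.length ((BheadF lines).drop j) j < lines.length
      ∧ firstTrue lines.length ((BheadF lines).drop j) j
          ≤ firstTrue lines.length ((BpairF lines).drop j) j then
    Bloop lines fuel (firstTrue lines.length ((BheadF lines).drop j) j + 1)
      (rs ++ [((start : Int), (firstTrue lines.length ((BheadF lines).drop j) j : Int) - 1)])
  else if firstTrue lines.length ((BpairF lines).drop j) j < lines.length then
    Bloop lines fuel (firstTrue lines.length ((BpairF lines).drop j) j + 1)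
      (rs ++ [((start : Int), (firstTrue lines.length ((BpairF lines).drop j) j : Int) - 2)])
  else rs ++ [((start : Int), (lines.length : Int) - 1)]

theorem Bloop_stop (lines : List String) (fuel i : Nat) (rs : List (Int × Int))
    (h : lines.length ≤ i) : Bloop lines fuel i rs = rs := by
  cases fuel <;> simp [Bloop, loopB, Nat.not_lt.2 h]

theorem drop_eq_getD_cons {α : Type} [Inhabited α] (l : List α) (d : α) (j : Nat)
    (h : j < l.length) : l.drop j = l.getD j d :: l.drop (j+1) := by
  rw [List.drop_eq_getElem_cons h, List.getD_eq_getElem _ _ h]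

theorem BheadF_length (lines : List String) : (BheadF lines).length = lines.length := by
  simp [BheadF]

theorem BpairF_length (lines : List String) : (BpairF lines).length = lines.length := by
  simp [BpairF, pairOf_length, Bpipe]

theorem Bpipe_getD (lines : List String) (i : Nat) (hi : i < lines.length) :
    (Bpipe lines).getD i false = is_table_line lines[i] := by
  rw [Bpipe, List.getD_eq_getElem _ _ (by simpa using hi), List.getElem_map]

theorem BheadF_getD (lines : List String) (i : Nat) (hi : i < lines.length) :
    (BheadF lines).getD i false = PySem.Str.startswith (PySem.Str.strip lines[i]) "#" := by
  rw [BheadF, List.getD_eq_getElem _ _ (by simpa using hi), List.getElem_map]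

theorem BpairF_getD (lines : List String) (j : Nat) (hj : j < lines.length) (h1 : 1 ≤ j) :
    (BpairF lines).getD j false
      = (!(Bpipe lines).getD (j-1) false && !(Bpipe lines).getD j false) := by
  have hlen : j < (Bpipe lines).length := by simpa [Bpipe] using hj
  have h := pairOf_getD (Bpipe lines) true j hlen
  rw [show BpairF lines = pairOf true (Bpipe lines) from rfl, h,
    if_neg (by omega : ¬ j = 0)]

-- B's outer loop, one step at i < n, phrased through A's line list
theorem Bloop_step (lines : List String) (fuel i : Nat) (rs : List (Int × Int))
    (hi : i < lines.length) :
    Bloop lines (fuel+1) i rs =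
      if is_table_line lines[i] &&
         decide (2 ≤ ((lines.drop i).take 3).countP (fun w => is_table_line w)) then
        Bjump lines fuel (i+1) i rs
      else Bloop lines fuel (i+1) rs := by
  rw [Bloop, loopB, if_pos hi]
  have hcond : ((Bpipe lines).getD i false &&
      decide (2 ≤ (((Bpipe lines).drop i).take 3).count true))
      = (is_table_line lines[i] &&
         decide (2 ≤ ((lines.drop i).take 3).countP (fun w => is_table_line w))) := by
    rw [Bpipe_getD lines i hi]
    congr 1
    simp [Bpipe, ← List.map_drop, ← List.map_take, List.count_eq_countP, List.countP_map,
      Function.comp_def]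
  rw [hcond]
  have hjh : (nextTrue lines.length (BheadF lines) 0).getD (i+1) lines.length
      = firstTrue lines.length ((BheadF lines).drop (i+1)) (i+1) := by
    simpa using nextTrue_getD lines.length (BheadF lines) 0 (i+1)
  have hjg : (nextTrue lines.length (BpairF lines) 0).getD (i+1) lines.length
      = firstTrue lines.length ((BpairF lines).drop (i+1)) (i+1) := by
    simpa using nextTrue_getD lines.length (BpairF lines) 0 (i+1)
  simp only [hjh, hjg, Bjump, Bloop]

-- the inner-scan value when the remaining suffix is exhausted (j = n)
theorem Bjump_eof (lines : List String) (fuel start : Nat) (rs : List (Int × Int)) :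
    Bjump lines fuel lines.length start rs
      = rs ++ [((start : Int), (lines.length : Int) - 1)] := by
  rw [Bjump]
  have hH : (BheadF lines).drop lines.length = [] :=
    List.drop_eq_nil_of_le (by rw [BheadF_length])
  have hP : (BpairF lines).drop lines.length = [] :=
    List.drop_eq_nil_of_le (by rw [BpairF_length])
  rw [hH, hP]
  simp [firstTrue]

-- a heading at j ends the block: (start, j-1), resume at j+1
theorem Bjump_heading (lines : List String) (fuel j start : Nat) (rs : List (Int × Int))
    (hlt : j < lines.length) (hh : (BheadF lines).getD j false = true) :
    Bjump lines fuel j start rs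
      = Bloop lines fuel (j+1) (rs ++ [((start : Int), (j : Int) - 1)]) := by
  have hH : (BheadF lines).drop j = true :: (BheadF lines).drop (j+1) := by
    rw [drop_eq_getD_cons _ false j (by rw [BheadF_length]; exact hlt), hh]
  rw [Bjump, hH]
  simp only [firstTrue, if_true]
  rw [if_pos ⟨hlt, firstTrue_ge lines.length _ j (by omega)⟩]

-- neither a heading nor a pair point at j: both lookups shift past j
theorem Bjump_shift (lines : List String) (fuel j start : Nat) (rs : List (Int × Int))
    (hlt : j < lines.length) (hh : (BheadF lines).getD j false = false)
    (hp : (BpairF lines).getD j false = false) :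
    Bjump lines fuel j start rs = Bjump lines fuel (j+1) start rs := by
  have hH : (BheadF lines).drop j = false :: (BheadF lines).drop (j+1) := by
    rw [drop_eq_getD_cons _ false j (by rw [BheadF_length]; exact hlt), hh]
  have hP : (BpairF lines).drop j = false :: (BpairF lines).drop (j+1) := by
    rw [drop_eq_getD_cons _ false j (by rw [BpairF_length]; exact hlt), hp]
  rw [Bjump, Bjump, hH, hP]
  simp only [firstTrue, Bool.false_eq_true, if_false]

-- a pair point at j (no heading): the block ends at (start, j-2), resume at j+1
theorem Bjump_pair (lines : List String) (fuel j start : Nat) (rs : List (Int × Int))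
    (hlt : j < lines.length) (hh : (BheadF lines).getD j false = false)
    (hp : (BpairF lines).getD j false = true) :
    Bjump lines fuel j start rs
      = Bloop lines fuel (j+1) (rs ++ [((start : Int), (j : Int) - 2)]) := by
  have hH : (BheadF lines).drop j = false :: (BheadF lines).drop (j+1) := by
    rw [drop_eq_getD_cons _ false j (by rw [BheadF_length]; exact hlt), hh]
  have hP : (BpairF lines).drop j = true :: (BpairF lines).drop (j+1) := by
    rw [drop_eq_getD_cons _ false j (by rw [BpairF_length]; exact hlt), hp]
  rw [Bjump, hH, hP]
  simp only [firstTrue, Bool.false_eq_true, if_false, if_true]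
  have hge : j + 1 ≤ firstTrue lines.length ((BheadF lines).drop (j+1)) (j+1) :=
    firstTrue_ge lines.length _ (j+1) (by omega)
  rw [if_neg (by omega), if_pos hlt]

-- Mutual invariant, by induction on a bound m on the number of remaining lines:
-- (outer) out of a table, A's fold from index i equals B's jump loop at i;
-- (inner) inside a table started at `start`, A's fold at index j with counter
-- `gap` equals the jump outcome computed from the two next-occurrence lookups
-- at j, provided gap is 0 exactly when line j-1 is a pipe line.
set_option maxHeartbeats 1600000 in
theorem mainEq (lines : List String) : ∀ (m : Nat),
    (∀ i fuel, lines.length - i ≤ m → lines.length - i + 1 ≤ fuel → ∀ st cnp rs,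
      loopA lines (lines.drop i) i false st cnp rs = Bloop lines fuel i rs)
    ∧ (∀ j fuel gap, lines.length - j ≤ m → j ≤ lines.length → 1 ≤ j → gap ≤ 1 →
        (Bpipe lines).getD (j-1) false = decide (gap = 0) →
        lines.length - j ≤ fuel → ∀ start rs,
      loopA lines (lines.drop j) j true start gap rs = Bjump lines fuel j start rs) := by
  intro m
  induction m with
  | zero =>
    constructor
    · intro i fuel hi _ st cnp rs
      have hni : lines.length ≤ i := by omega
      rw [List.drop_eq_nil_of_le hni, Bloop_stop lines fuel i rs hni]
      simp [loopA]
    · intro j fuel gap hj hjn _ _ _ _ start rs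
      have hjeq : j = lines.length := by omega
      subst hjeq
      rw [List.drop_eq_nil_of_le (le_refl _), Bjump_eof]
      simp [loopA]
  | succ m ih =>
    constructor
    · intro i fuel hi hf st cnp rs
      by_cases hlt : i < lines.length
      case neg =>
        have hni : lines.length ≤ i := by omega
        rw [List.drop_eq_nil_of_le hni, Bloop_stop lines fuel i rs hni]
        simp [loopA]
      obtain ⟨f, rfl⟩ : ∃ f, fuel = f + 1 := ⟨fuel - 1, by omega⟩
      have hdrop : lines.drop i = lines[i] :: lines.drop (i+1) := List.drop_eq_getElem_cons hlt
      rw [hdrop, Bloop_step lines f i rs hlt]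
      simp only [loopA, Bool.not_false, if_true]
      by_cases hp : is_table_line lines[i] = true
      · by_cases hw : 2 ≤ List.countP (fun w => is_table_line w) ((lines[i] :: lines.drop (i+1)).take 3)
        · have hw' : 2 ≤ List.countP (fun w => is_table_line w) ((lines.drop i).take 3) := by
            rw [hdrop]; exact hw
          rw [if_pos hp, if_pos hw, if_pos (by simp [hp, hw'])]
          exact ih.2 (i+1) f 0 (by omega) (by omega) (by omega) (by omega)
            (by simp only [Nat.add_sub_cancel]; rw [Bpipe_getD lines i hlt, hp]; simp)
            (by omega) i rs
        · have hw' : ¬ 2 ≤ List.countP (fun w => is_table_line w) ((lines.drop i).take 3) := by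
            rw [hdrop]; exact hw
          rw [if_pos hp, if_neg hw, if_neg (by simp [hw'])]
          exact ih.1 (i+1) f (by omega) (by omega) st cnp rs
      · rw [if_neg hp, if_neg (by simp [hp])]
        exact ih.1 (i+1) f (by omega) (by omega) st cnp rs
    · intro j fuel gap hj hjn hj1 hgap hprev hfu start rs
      by_cases hlt : j < lines.length
      case neg =>
        have hjeq : j = lines.length := by omega
        subst hjeq
        rw [List.drop_eq_nil_of_le (le_refl _), Bjump_eof]
        simp [loopA]
      have hdrop : lines.drop j = lines[j] :: lines.drop (j+1) := List.drop_eq_getElem_cons hlt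
      rw [hdrop]
      simp only [loopA, Bool.not_true]
      rw [if_neg (by simp : ¬ (false = true))]
      by_cases hh : PySem.Str.startswith (PySem.Str.strip lines[j]) "#" = true
      · -- heading line: table ends at j-1, outer scan resumes at j+1
        rw [if_pos hh,
          Bjump_heading lines fuel j start rs hlt (by rw [BheadF_getD lines j hlt, hh])]
        exact ih.1 (j+1) fuel (by omega) (by omega) start gap (rs ++ [((start : Int), (j : Int) - 1)])
      · rw [if_neg hh]
        have hhf : (BheadF lines).getD j false = false := by
          rw [BheadF_getD lines j hlt]; exact eq_false_of_ne_true hh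
        by_cases hp : is_table_line lines[j] = true
        · -- pipe line: counter resets; both lookups shift past j
          rw [if_pos hp,
            Bjump_shift lines fuel j start rs hlt hhf
              (by rw [BpairF_getD lines j hlt hj1, Bpipe_getD lines j hlt, hp]; simp)]
          exact ih.2 (j+1) fuel 0 (by omega) (by omega) (by omega) (by omega)
            (by simp only [Nat.add_sub_cancel]; rw [Bpipe_getD lines j hlt, hp]; simp)
            (by omega) start rs
        · rw [if_neg hp]
          rcases Nat.le_one_iff_eq_zero_or_eq_one.1 hgap with hg0 | hg1
          · -- first gap line: previous line was a pipe, so no pair completes at j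
            subst hg0
            simp only [decide_true] at hprev
            have hA : loopA lines (lines.drop (j+1)) (j+1) true start 1 rs
                = Bjump lines fuel j start rs := by
              rw [Bjump_shift lines fuel j start rs hlt hhf
                (by rw [BpairF_getD lines j hlt hj1, hprev]; simp)]
              exact ih.2 (j+1) fuel 1 (by omega) (by omega) (by omega) (by omega)
                (by simp only [Nat.add_sub_cancel]
                    rw [Bpipe_getD lines j hlt, eq_false_of_ne_true hp]; simp)
                (by omega) start rs
            by_cases hb : (PySem.Str.strip lines[j] == "") = true
            · simpa [hb] using hA
            · simpa [hb] using hA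
          · -- second consecutive gap line: the pair completes at j, end = j-2
            subst hg1
            replace hprev := hprev.trans (by decide : decide ((1:Nat) = 0) = false)
            have hB : Bjump lines fuel j start rs
                = Bloop lines fuel (j+1) (rs ++ [((start : Int), (j : Int) - 2)]) :=
              Bjump_pair lines fuel j start rs hlt hhf
                (by rw [BpairF_getD lines j hlt hj1, hprev, Bpipe_getD lines j hlt,
                      eq_false_of_ne_true hp]; simp)
            have houter := ih.1 (j+1) fuel (by omega) (by omega) start 2
              (rs ++ [((start : Int), (j : Int) - 2)])
            rw [hB, ← houter]
            by_cases hb : (PySem.Str.strip lines[j] == "") = true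
            · simp [hb]
            · simp [hb]

-- ===== VERDICT (by name: the statement is the Claim_ definition above) =====
theorem detect_residual_table_ranges_spec : Claim_equal_detect_residual_table_ranges := by
  intro text _
  unfold Spec_detect_residual_table_ranges detect_residual_table_ranges detect_residual_table_ranges_alt
  have h := (mainEq ((PySem.Str.split? text "\n").getD [])
      ((PySem.Str.split? text "\n").getD []).length).1 0
      (((PySem.Str.split? text "\n").getD []).length + 1) (by omega) (by omega) 0 0 []
  simpa [Bloop, Bpipe, BheadF, BpairF] using h
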